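-- pv_equiv track=rewrite | github.com/almasbejsenbek/pp2_2024_spring | Week3/Python_Classes/8.py | order007
-- ===== SOURCE A (Python) =====
-- def order007(nums):
--     pattern = [0, 0, 7]
--
--     for num in nums:
--         if num == pattern[0]:
--             pattern.pop(0)
--             if not pattern:
--                 return True
--
--     return False
-- ===== SOURCE B (Python) =====
-- def order007(nums):
--     nums = list(nums)
--     try:
--         i = nums.index(0)
--         j = nums.index(0, i + 1)
--         nums.index(7, j + 1)
--         return True
--     except ValueError:
--         return False
-- ===== Notes on version B (the rewrite author's own statement) =====
-- stated objective: alternative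
-- what changed: Replaces the single greedy pass that pops a mutable pattern list with three successive list.index forward searches (find first 0, next 0 after it, then a 7 after that), wrapped in try/except ValueError.
import Mathlib
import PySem

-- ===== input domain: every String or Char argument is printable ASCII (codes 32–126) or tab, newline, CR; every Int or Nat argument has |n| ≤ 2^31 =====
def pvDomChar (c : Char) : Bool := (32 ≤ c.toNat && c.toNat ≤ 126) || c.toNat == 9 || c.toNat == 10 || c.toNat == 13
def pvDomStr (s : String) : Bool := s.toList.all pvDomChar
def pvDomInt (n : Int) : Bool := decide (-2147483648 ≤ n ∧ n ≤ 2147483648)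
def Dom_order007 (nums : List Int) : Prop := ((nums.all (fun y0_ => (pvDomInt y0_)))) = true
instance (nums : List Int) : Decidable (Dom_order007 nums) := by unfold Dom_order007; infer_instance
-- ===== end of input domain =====

-- B replaces A's single greedy pattern-popping pass by three successive forward `.index` searches; alternative decomposition, same cost.

-- ===== PORT A =====
-- loop over nums with the mutable `pattern` list as the accumulator; `pattern.pop(0)` = drop the head.
-- The `[]` pattern branch is unreachable (the loop returns True as soon as pattern empties).
def order007Loop (nums : List Int) (pattern : List Int) : Bool :=
  match nums with
  | [] => false
  | n :: rest =>
    match pattern with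
    | [] => false
    | p :: ps =>
      if n = p then
        (if ps = [] then true else order007Loop rest ps)
      else
        order007Loop rest (p :: ps)

def order007 (nums : List Int) : Bool := order007Loop nums [0, 0, 7]

-- ===== PORT B =====
-- nums.index(v, start) = PySem.List.index? (nums.drop start) v shifted by start; since each later search
-- starts right after the previous hit, the shifts compose as nested drops and the absolute offsets cancel.
def order007_alt (nums : List Int) : Bool :=
  match PySem.List.index? nums 0 with
  | none => false
  | some i =>
    match PySem.List.index? (nums.drop (i + 1)) 0 with
    | none => false
    | some j =>
      match PySem.List.index? ((nums.drop (i + 1)).drop (j + 1)) 7 with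
      | none => false
      | some _ => true

-- ===== PRECONDITION & SPEC =====
def Spec_order007 (nums : List Int) (out : Bool) : Prop := out = order007_alt nums
instance (nums : List Int) (out : Bool) : Decidable (Spec_order007 nums out) := by unfold Spec_order007; infer_instance

-- ===== CLAIM (what is proved, stated in full; the proofs are below) =====
def Claim_equal_order007 : Prop := ∀ (nums : List Int), Dom_order007 nums → Spec_order007 nums (order007 nums)

-- ===== LEMMAS AND PROOFS =====

-- A's greedy loop on a nonempty pattern = find the first occurrence of the pattern head,
-- then continue the loop on the remainder with the popped pattern.
theorem order007Loop_eq_index (nums : List Int) (p : Int) (ps : List Int) :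
    order007Loop nums (p :: ps) =
      match PySem.List.index? nums p with
      | none => false
      | some i => (if ps = [] then true else order007Loop (nums.drop (i + 1)) ps) := by
  induction nums with
  | nil => simp [order007Loop, PySem.List.index?_eq_idxOf?]
  | cons n rest ih =>
    by_cases h : n = p
    · subst h
      rw [PySem.List.index?_cons_self]
      simp [order007Loop]
    · have hne : ¬ (n = p) := h
      rw [show order007Loop (n :: rest) (p :: ps) = order007Loop rest (p :: ps) from by
        simp [order007Loop, hne]]
      rw [ih, PySem.List.index?_cons_of_ne rest hne]
      cases hidx : PySem.List.index? rest p with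
      | none => simp
      | some i => simp

-- ===== VERDICT (by name: the statement is the Claim_ definition above) =====
theorem order007_spec : Claim_equal_order007 := by
  intro nums _
  unfold Spec_order007 order007 order007_alt
  rw [order007Loop_eq_index]
  cases h0 : PySem.List.index? nums 0 with
  | none => rfl
  | some i =>
    simp only []
    rw [order007Loop_eq_index]
    cases h1 : PySem.List.index? (nums.drop (i + 1)) 0 with
    | none => rfl
    | some j =>
      simp only []
      rw [order007Loop_eq_index]
      cases h2 : PySem.List.index? ((nums.drop (i + 1)).drop (j + 1)) 7 with
      | none => rfl
      | some k => rfl
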